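-- pv_equiv track=rewrite | github.com/Aargh89/sportmaster-card-agent | src/sportmaster_card/tools/wb_search.py | wb_get_image_url
-- ===== SOURCE A (Python) =====
-- def wb_get_image_url(product_id: int, photo_index: int = 1) -> str:
--     """Construct WB product image URL from product ID.
--
--     WB uses a CDN with numbered baskets. The basket number is determined
--     by the product ID range (vol = id // 100000).
--
--     Args:
--         product_id: WB product article number.
--         photo_index: Image index (1-based).
--
--     Returns:
--         Direct URL to the product image on WB CDN.
--     """
--     vol = product_id // 100000
--     part = product_id // 1000
--
--     # Basket routing by vol ranges (from Duff89/wildberries_parser)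
--     basket_ranges = [
--         (143, "01"), (287, "02"), (431, "03"), (719, "04"), (1007, "05"),
--         (1061, "06"), (1115, "07"), (1169, "08"), (1313, "09"), (1601, "10"),
--         (1655, "11"), (1919, "12"), (2045, "13"), (2189, "14"), (2405, "15"),
--     ]
--     basket = "16"
--     for threshold, basket_num in basket_ranges:
--         if vol <= threshold:
--             basket = basket_num
--             break
--
--     return f"https://basket-{basket}.wbbasket.ru/vol{vol}/part{part}/{product_id}/images/big/{photo_index}.webp"
-- ===== SOURCE B (Python) =====
-- def wb_get_image_url(product_id: int, photo_index: int = 1) -> str: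
--     """Same URL as A, but the basket slot is found by hand-written binary search
--     over parallel threshold/basket arrays instead of a sequential scan."""
--     vol = product_id // 100000
--     part = product_id // 1000
--     thresholds = [143, 287, 431, 719, 1007, 1061, 1115, 1169, 1313, 1601,
--                   1655, 1919, 2045, 2189, 2405]
--     baskets = ["01", "02", "03", "04", "05", "06", "07", "08", "09", "10",
--                "11", "12", "13", "14", "15"]
--     lo, hi = 0, len(thresholds)
--     while lo < hi:
--         mid = (lo + hi) // 2
--         if thresholds[mid] < vol:
--             lo = mid + 1
--         else:
--             hi = mid
--     basket = baskets[lo] if lo < len(baskets) else "16"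
--     return f"https://basket-{basket}.wbbasket.ru/vol{vol}/part{part}/{product_id}/images/big/{photo_index}.webp"
-- ===== Notes on version B (the rewrite author's own statement) =====
-- stated objective: alternative
-- what changed: The basket number is found by a hand-written binary search (lo/hi bisection) over parallel sorted-threshold and basket-string arrays instead of A's sequential scan with early break over (threshold, basket) pairs.
import Mathlib
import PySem

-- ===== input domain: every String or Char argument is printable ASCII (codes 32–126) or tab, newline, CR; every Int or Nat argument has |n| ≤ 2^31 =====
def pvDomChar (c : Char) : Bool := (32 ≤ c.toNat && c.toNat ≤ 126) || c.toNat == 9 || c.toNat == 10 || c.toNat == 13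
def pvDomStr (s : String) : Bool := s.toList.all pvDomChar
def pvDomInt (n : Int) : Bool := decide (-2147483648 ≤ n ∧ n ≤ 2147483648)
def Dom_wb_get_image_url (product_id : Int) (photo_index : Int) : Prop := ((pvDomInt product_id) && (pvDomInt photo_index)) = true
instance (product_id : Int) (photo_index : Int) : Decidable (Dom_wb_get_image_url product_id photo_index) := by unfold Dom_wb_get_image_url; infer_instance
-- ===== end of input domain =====

-- B replaces A's sequential scan over (threshold, basket) pairs with a hand-written
-- binary search over parallel threshold/basket arrays (objective: alternative).

-- ===== PORT A =====
-- A's for-loop with early break over the (threshold, basket) pairs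
def wbScanBasket : Int → List (Int × String) → String
  | _, [] => "16"
  | vol, (t, b) :: rest => if vol ≤ t then b else wbScanBasket vol rest

def wb_get_image_url (product_id : Int) (photo_index : Int) : String :=
  let vol := PySem.Int.floordiv product_id 100000
  let part := PySem.Int.floordiv product_id 1000
  let basket := wbScanBasket vol
    [(143, "01"), (287, "02"), (431, "03"), (719, "04"), (1007, "05"),
     (1061, "06"), (1115, "07"), (1169, "08"), (1313, "09"), (1601, "10"),
     (1655, "11"), (1919, "12"), (2045, "13"), (2189, "14"), (2405, "15")]
  "https://basket-" ++ basket ++ ".wbbasket.ru/vol" ++ PySem.Int.toStr vol ++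
    "/part" ++ PySem.Int.toStr part ++ "/" ++ PySem.Int.toStr product_id ++
    "/images/big/" ++ PySem.Int.toStr photo_index ++ ".webp"

-- ===== PORT B =====
-- B's while-loop binary search (lo/hi halving); thresholds[mid] is always in range,
-- so List.getD is an exact port of the Python indexing
def wbBisect (xs : List Int) (x : Int) (lo hi : Nat) : Nat :=
  if h : lo < hi then
    if xs.getD ((lo + hi) / 2) 0 < x then wbBisect xs x ((lo + hi) / 2 + 1) hi
    else wbBisect xs x lo ((lo + hi) / 2)
  else lo
termination_by hi - lo
decreasing_by all_goals omega

def wb_get_image_url_alt (product_id : Int) (photo_index : Int) : String :=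
  let vol := PySem.Int.floordiv product_id 100000
  let part := PySem.Int.floordiv product_id 1000
  let thresholds : List Int := [143, 287, 431, 719, 1007, 1061, 1115, 1169, 1313, 1601, 1655, 1919, 2045, 2189, 2405]
  let baskets : List String := ["01", "02", "03", "04", "05", "06", "07", "08", "09", "10", "11", "12", "13", "14", "15"]
  let lo := wbBisect thresholds vol 0 thresholds.length
  let basket := if lo < baskets.length then baskets.getD lo "16" else "16"
  "https://basket-" ++ basket ++ ".wbbasket.ru/vol" ++ PySem.Int.toStr vol ++
    "/part" ++ PySem.Int.toStr part ++ "/" ++ PySem.Int.toStr product_id ++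
    "/images/big/" ++ PySem.Int.toStr photo_index ++ ".webp"

-- ===== PRECONDITION & SPEC =====
def Spec_wb_get_image_url (product_id : Int) (photo_index : Int) (out : String) : Prop := out = wb_get_image_url_alt product_id photo_index
instance (product_id : Int) (photo_index : Int) (out : String) : Decidable (Spec_wb_get_image_url product_id photo_index out) := by unfold Spec_wb_get_image_url; infer_instance

-- ===== CLAIM (what is proved, stated in full; the proofs are below) =====
def Claim_equal_wb_get_image_url : Prop := ∀ (product_id : Int) (photo_index : Int), Dom_wb_get_image_url product_id photo_index → Spec_wb_get_image_url product_id photo_index (wb_get_image_url product_id photo_index)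

-- ===== LEMMAS AND PROOFS =====

-- one-step rewriting lemmas for the binary search and the scan
theorem bisL (xs : List Int) (x : Int) (lo hi : Nat) (h : lo < hi)
    (hc : xs.getD ((lo + hi) / 2) 0 < x) :
    wbBisect xs x lo hi = wbBisect xs x ((lo + hi) / 2 + 1) hi := by
  rw [wbBisect]; simp only [dif_pos h, if_pos hc]

theorem bisG (xs : List Int) (x : Int) (lo hi : Nat) (h : lo < hi)
    (hc : ¬ xs.getD ((lo + hi) / 2) 0 < x) :
    wbBisect xs x lo hi = wbBisect xs x lo ((lo + hi) / 2) := by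
  rw [wbBisect]; simp only [dif_pos h, if_neg hc]

theorem bisE (xs : List Int) (x : Int) (lo hi : Nat) (h : ¬ lo < hi) :
    wbBisect xs x lo hi = lo := by
  rw [wbBisect]; simp only [dif_neg h]

theorem scanPos (vol t : Int) (b : String) (rest : List (Int × String)) (h : vol ≤ t) :
    wbScanBasket vol ((t, b) :: rest) = b := by
  simp only [wbScanBasket, if_pos h]

theorem scanNeg (vol t : Int) (b : String) (rest : List (Int × String)) (h : ¬ vol ≤ t) :
    wbScanBasket vol ((t, b) :: rest) = wbScanBasket vol rest := by
  simp only [wbScanBasket, if_neg h]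

-- the two basket computations agree for every vol (16 vol-regions)
theorem wbBasket_eq (vol : Int) :
    wbScanBasket vol
      [(143, "01"), (287, "02"), (431, "03"), (719, "04"), (1007, "05"),
       (1061, "06"), (1115, "07"), (1169, "08"), (1313, "09"), (1601, "10"),
       (1655, "11"), (1919, "12"), (2045, "13"), (2189, "14"), (2405, "15")] =
    (if wbBisect [143, 287, 431, 719, 1007, 1061, 1115, 1169, 1313, 1601, 1655, 1919, 2045, 2189, 2405] vol 0 15 < 15 then
       (["01", "02", "03", "04", "05", "06", "07", "08", "09", "10", "11", "12", "13", "14", "15"] : List String).getD (wbBisect [143, 287, 431, 719, 1007, 1061, 1115, 1169, 1313, 1601, 1655, 1919, 2045, 2189, 2405] vol 0 15) "16"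
     else "16") := by
  by_cases h0 : vol ≤ 143
  · -- region 0
    have e : wbBisect [143, 287, 431, 719, 1007, 1061, 1115, 1169, 1313, 1601, 1655, 1919, 2045, 2189, 2405] vol 0 15 = 0 := by
      rw [bisG _ _ _ _ (by norm_num) (by show ¬ (1169:Int) < vol; omega)]; norm_num
      rw [bisG _ _ _ _ (by norm_num) (by show ¬ (719:Int) < vol; omega)]; norm_num
      rw [bisG _ _ _ _ (by norm_num) (by show ¬ (287:Int) < vol; omega)]; norm_num
      rw [bisG _ _ _ _ (by norm_num) (by show ¬ (143:Int) < vol; omega)]; norm_num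
      exact bisE _ _ _ _ (by norm_num)
    rw [e]
    rw [if_pos (by norm_num : (0:Nat) < 15)]
    rw [scanPos _ _ _ _ (by omega)]
    rfl
  by_cases h1 : vol ≤ 287
  · -- region 1
    have e : wbBisect [143, 287, 431, 719, 1007, 1061, 1115, 1169, 1313, 1601, 1655, 1919, 2045, 2189, 2405] vol 0 15 = 1 := by
      rw [bisG _ _ _ _ (by norm_num) (by show ¬ (1169:Int) < vol; omega)]; norm_num
      rw [bisG _ _ _ _ (by norm_num) (by show ¬ (719:Int) < vol; omega)]; norm_num
      rw [bisG _ _ _ _ (by norm_num) (by show ¬ (287:Int) < vol; omega)]; norm_num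
      rw [bisL _ _ _ _ (by norm_num) (by show (143:Int) < vol; omega)]; norm_num
      exact bisE _ _ _ _ (by norm_num)
    rw [e]
    rw [if_pos (by norm_num : (1:Nat) < 15)]
    rw [scanNeg _ _ _ _ (by omega)]
    rw [scanPos _ _ _ _ (by omega)]
    rfl
  by_cases h2 : vol ≤ 431
  · -- region 2
    have e : wbBisect [143, 287, 431, 719, 1007, 1061, 1115, 1169, 1313, 1601, 1655, 1919, 2045, 2189, 2405] vol 0 15 = 2 := by
      rw [bisG _ _ _ _ (by norm_num) (by show ¬ (1169:Int) < vol; omega)]; norm_num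
      rw [bisG _ _ _ _ (by norm_num) (by show ¬ (719:Int) < vol; omega)]; norm_num
      rw [bisL _ _ _ _ (by norm_num) (by show (287:Int) < vol; omega)]; norm_num
      rw [bisG _ _ _ _ (by norm_num) (by show ¬ (431:Int) < vol; omega)]; norm_num
      exact bisE _ _ _ _ (by norm_num)
    rw [e]
    rw [if_pos (by norm_num : (2:Nat) < 15)]
    rw [scanNeg _ _ _ _ (by omega)]
    rw [scanNeg _ _ _ _ (by omega)]
    rw [scanPos _ _ _ _ (by omega)]
    rfl
  by_cases h3 : vol ≤ 719
  · -- region 3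
    have e : wbBisect [143, 287, 431, 719, 1007, 1061, 1115, 1169, 1313, 1601, 1655, 1919, 2045, 2189, 2405] vol 0 15 = 3 := by
      rw [bisG _ _ _ _ (by norm_num) (by show ¬ (1169:Int) < vol; omega)]; norm_num
      rw [bisG _ _ _ _ (by norm_num) (by show ¬ (719:Int) < vol; omega)]; norm_num
      rw [bisL _ _ _ _ (by norm_num) (by show (287:Int) < vol; omega)]; norm_num
      rw [bisL _ _ _ _ (by norm_num) (by show (431:Int) < vol; omega)]; norm_num
      exact bisE _ _ _ _ (by norm_num)
    rw [e]
    rw [if_pos (by norm_num : (3:Nat) < 15)]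
    rw [scanNeg _ _ _ _ (by omega)]
    rw [scanNeg _ _ _ _ (by omega)]
    rw [scanNeg _ _ _ _ (by omega)]
    rw [scanPos _ _ _ _ (by omega)]
    rfl
  by_cases h4 : vol ≤ 1007
  · -- region 4
    have e : wbBisect [143, 287, 431, 719, 1007, 1061, 1115, 1169, 1313, 1601, 1655, 1919, 2045, 2189, 2405] vol 0 15 = 4 := by
      rw [bisG _ _ _ _ (by norm_num) (by show ¬ (1169:Int) < vol; omega)]; norm_num
      rw [bisL _ _ _ _ (by norm_num) (by show (719:Int) < vol; omega)]; norm_num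
      rw [bisG _ _ _ _ (by norm_num) (by show ¬ (1061:Int) < vol; omega)]; norm_num
      rw [bisG _ _ _ _ (by norm_num) (by show ¬ (1007:Int) < vol; omega)]; norm_num
      exact bisE _ _ _ _ (by norm_num)
    rw [e]
    rw [if_pos (by norm_num : (4:Nat) < 15)]
    rw [scanNeg _ _ _ _ (by omega)]
    rw [scanNeg _ _ _ _ (by omega)]
    rw [scanNeg _ _ _ _ (by omega)]
    rw [scanNeg _ _ _ _ (by omega)]
    rw [scanPos _ _ _ _ (by omega)]
    rfl
  by_cases h5 : vol ≤ 1061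
  · -- region 5
    have e : wbBisect [143, 287, 431, 719, 1007, 1061, 1115, 1169, 1313, 1601, 1655, 1919, 2045, 2189, 2405] vol 0 15 = 5 := by
      rw [bisG _ _ _ _ (by norm_num) (by show ¬ (1169:Int) < vol; omega)]; norm_num
      rw [bisL _ _ _ _ (by norm_num) (by show (719:Int) < vol; omega)]; norm_num
      rw [bisG _ _ _ _ (by norm_num) (by show ¬ (1061:Int) < vol; omega)]; norm_num
      rw [bisL _ _ _ _ (by norm_num) (by show (1007:Int) < vol; omega)]; norm_num
      exact bisE _ _ _ _ (by norm_num)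
    rw [e]
    rw [if_pos (by norm_num : (5:Nat) < 15)]
    rw [scanNeg _ _ _ _ (by omega)]
    rw [scanNeg _ _ _ _ (by omega)]
    rw [scanNeg _ _ _ _ (by omega)]
    rw [scanNeg _ _ _ _ (by omega)]
    rw [scanNeg _ _ _ _ (by omega)]
    rw [scanPos _ _ _ _ (by omega)]
    rfl
  by_cases h6 : vol ≤ 1115
  · -- region 6
    have e : wbBisect [143, 287, 431, 719, 1007, 1061, 1115, 1169, 1313, 1601, 1655, 1919, 2045, 2189, 2405] vol 0 15 = 6 := by
      rw [bisG _ _ _ _ (by norm_num) (by show ¬ (1169:Int) < vol; omega)]; norm_num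
      rw [bisL _ _ _ _ (by norm_num) (by show (719:Int) < vol; omega)]; norm_num
      rw [bisL _ _ _ _ (by norm_num) (by show (1061:Int) < vol; omega)]; norm_num
      rw [bisG _ _ _ _ (by norm_num) (by show ¬ (1115:Int) < vol; omega)]; norm_num
      exact bisE _ _ _ _ (by norm_num)
    rw [e]
    rw [if_pos (by norm_num : (6:Nat) < 15)]
    rw [scanNeg _ _ _ _ (by omega)]
    rw [scanNeg _ _ _ _ (by omega)]
    rw [scanNeg _ _ _ _ (by omega)]
    rw [scanNeg _ _ _ _ (by omega)]
    rw [scanNeg _ _ _ _ (by omega)]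
    rw [scanNeg _ _ _ _ (by omega)]
    rw [scanPos _ _ _ _ (by omega)]
    rfl
  by_cases h7 : vol ≤ 1169
  · -- region 7
    have e : wbBisect [143, 287, 431, 719, 1007, 1061, 1115, 1169, 1313, 1601, 1655, 1919, 2045, 2189, 2405] vol 0 15 = 7 := by
      rw [bisG _ _ _ _ (by norm_num) (by show ¬ (1169:Int) < vol; omega)]; norm_num
      rw [bisL _ _ _ _ (by norm_num) (by show (719:Int) < vol; omega)]; norm_num
      rw [bisL _ _ _ _ (by norm_num) (by show (1061:Int) < vol; omega)]; norm_num
      rw [bisL _ _ _ _ (by norm_num) (by show (1115:Int) < vol; omega)]; norm_num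
      exact bisE _ _ _ _ (by norm_num)
    rw [e]
    rw [if_pos (by norm_num : (7:Nat) < 15)]
    rw [scanNeg _ _ _ _ (by omega)]
    rw [scanNeg _ _ _ _ (by omega)]
    rw [scanNeg _ _ _ _ (by omega)]
    rw [scanNeg _ _ _ _ (by omega)]
    rw [scanNeg _ _ _ _ (by omega)]
    rw [scanNeg _ _ _ _ (by omega)]
    rw [scanNeg _ _ _ _ (by omega)]
    rw [scanPos _ _ _ _ (by omega)]
    rfl
  by_cases h8 : vol ≤ 1313
  · -- region 8
    have e : wbBisect [143, 287, 431, 719, 1007, 1061, 1115, 1169, 1313, 1601, 1655, 1919, 2045, 2189, 2405] vol 0 15 = 8 := by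
      rw [bisL _ _ _ _ (by norm_num) (by show (1169:Int) < vol; omega)]; norm_num
      rw [bisG _ _ _ _ (by norm_num) (by show ¬ (1919:Int) < vol; omega)]; norm_num
      rw [bisG _ _ _ _ (by norm_num) (by show ¬ (1601:Int) < vol; omega)]; norm_num
      rw [bisG _ _ _ _ (by norm_num) (by show ¬ (1313:Int) < vol; omega)]; norm_num
      exact bisE _ _ _ _ (by norm_num)
    rw [e]
    rw [if_pos (by norm_num : (8:Nat) < 15)]
    rw [scanNeg _ _ _ _ (by omega)]
    rw [scanNeg _ _ _ _ (by omega)]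
    rw [scanNeg _ _ _ _ (by omega)]
    rw [scanNeg _ _ _ _ (by omega)]
    rw [scanNeg _ _ _ _ (by omega)]
    rw [scanNeg _ _ _ _ (by omega)]
    rw [scanNeg _ _ _ _ (by omega)]
    rw [scanNeg _ _ _ _ (by omega)]
    rw [scanPos _ _ _ _ (by omega)]
    rfl
  by_cases h9 : vol ≤ 1601
  · -- region 9
    have e : wbBisect [143, 287, 431, 719, 1007, 1061, 1115, 1169, 1313, 1601, 1655, 1919, 2045, 2189, 2405] vol 0 15 = 9 := by
      rw [bisL _ _ _ _ (by norm_num) (by show (1169:Int) < vol; omega)]; norm_num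
      rw [bisG _ _ _ _ (by norm_num) (by show ¬ (1919:Int) < vol; omega)]; norm_num
      rw [bisG _ _ _ _ (by norm_num) (by show ¬ (1601:Int) < vol; omega)]; norm_num
      rw [bisL _ _ _ _ (by norm_num) (by show (1313:Int) < vol; omega)]; norm_num
      exact bisE _ _ _ _ (by norm_num)
    rw [e]
    rw [if_pos (by norm_num : (9:Nat) < 15)]
    rw [scanNeg _ _ _ _ (by omega)]
    rw [scanNeg _ _ _ _ (by omega)]
    rw [scanNeg _ _ _ _ (by omega)]
    rw [scanNeg _ _ _ _ (by omega)]
    rw [scanNeg _ _ _ _ (by omega)]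
    rw [scanNeg _ _ _ _ (by omega)]
    rw [scanNeg _ _ _ _ (by omega)]
    rw [scanNeg _ _ _ _ (by omega)]
    rw [scanNeg _ _ _ _ (by omega)]
    rw [scanPos _ _ _ _ (by omega)]
    rfl
  by_cases h10 : vol ≤ 1655
  · -- region 10
    have e : wbBisect [143, 287, 431, 719, 1007, 1061, 1115, 1169, 1313, 1601, 1655, 1919, 2045, 2189, 2405] vol 0 15 = 10 := by
      rw [bisL _ _ _ _ (by norm_num) (by show (1169:Int) < vol; omega)]; norm_num
      rw [bisG _ _ _ _ (by norm_num) (by show ¬ (1919:Int) < vol; omega)]; norm_num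
      rw [bisL _ _ _ _ (by norm_num) (by show (1601:Int) < vol; omega)]; norm_num
      rw [bisG _ _ _ _ (by norm_num) (by show ¬ (1655:Int) < vol; omega)]; norm_num
      exact bisE _ _ _ _ (by norm_num)
    rw [e]
    rw [if_pos (by norm_num : (10:Nat) < 15)]
    rw [scanNeg _ _ _ _ (by omega)]
    rw [scanNeg _ _ _ _ (by omega)]
    rw [scanNeg _ _ _ _ (by omega)]
    rw [scanNeg _ _ _ _ (by omega)]
    rw [scanNeg _ _ _ _ (by omega)]
    rw [scanNeg _ _ _ _ (by omega)]
    rw [scanNeg _ _ _ _ (by omega)]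
    rw [scanNeg _ _ _ _ (by omega)]
    rw [scanNeg _ _ _ _ (by omega)]
    rw [scanNeg _ _ _ _ (by omega)]
    rw [scanPos _ _ _ _ (by omega)]
    rfl
  by_cases h11 : vol ≤ 1919
  · -- region 11
    have e : wbBisect [143, 287, 431, 719, 1007, 1061, 1115, 1169, 1313, 1601, 1655, 1919, 2045, 2189, 2405] vol 0 15 = 11 := by
      rw [bisL _ _ _ _ (by norm_num) (by show (1169:Int) < vol; omega)]; norm_num
      rw [bisG _ _ _ _ (by norm_num) (by show ¬ (1919:Int) < vol; omega)]; norm_num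
      rw [bisL _ _ _ _ (by norm_num) (by show (1601:Int) < vol; omega)]; norm_num
      rw [bisL _ _ _ _ (by norm_num) (by show (1655:Int) < vol; omega)]; norm_num
      exact bisE _ _ _ _ (by norm_num)
    rw [e]
    rw [if_pos (by norm_num : (11:Nat) < 15)]
    rw [scanNeg _ _ _ _ (by omega)]
    rw [scanNeg _ _ _ _ (by omega)]
    rw [scanNeg _ _ _ _ (by omega)]
    rw [scanNeg _ _ _ _ (by omega)]
    rw [scanNeg _ _ _ _ (by omega)]
    rw [scanNeg _ _ _ _ (by omega)]
    rw [scanNeg _ _ _ _ (by omega)]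
    rw [scanNeg _ _ _ _ (by omega)]
    rw [scanNeg _ _ _ _ (by omega)]
    rw [scanNeg _ _ _ _ (by omega)]
    rw [scanNeg _ _ _ _ (by omega)]
    rw [scanPos _ _ _ _ (by omega)]
    rfl
  by_cases h12 : vol ≤ 2045
  · -- region 12
    have e : wbBisect [143, 287, 431, 719, 1007, 1061, 1115, 1169, 1313, 1601, 1655, 1919, 2045, 2189, 2405] vol 0 15 = 12 := by
      rw [bisL _ _ _ _ (by norm_num) (by show (1169:Int) < vol; omega)]; norm_num
      rw [bisL _ _ _ _ (by norm_num) (by show (1919:Int) < vol; omega)]; norm_num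
      rw [bisG _ _ _ _ (by norm_num) (by show ¬ (2189:Int) < vol; omega)]; norm_num
      rw [bisG _ _ _ _ (by norm_num) (by show ¬ (2045:Int) < vol; omega)]; norm_num
      exact bisE _ _ _ _ (by norm_num)
    rw [e]
    rw [if_pos (by norm_num : (12:Nat) < 15)]
    rw [scanNeg _ _ _ _ (by omega)]
    rw [scanNeg _ _ _ _ (by omega)]
    rw [scanNeg _ _ _ _ (by omega)]
    rw [scanNeg _ _ _ _ (by omega)]
    rw [scanNeg _ _ _ _ (by omega)]
    rw [scanNeg _ _ _ _ (by omega)]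
    rw [scanNeg _ _ _ _ (by omega)]
    rw [scanNeg _ _ _ _ (by omega)]
    rw [scanNeg _ _ _ _ (by omega)]
    rw [scanNeg _ _ _ _ (by omega)]
    rw [scanNeg _ _ _ _ (by omega)]
    rw [scanNeg _ _ _ _ (by omega)]
    rw [scanPos _ _ _ _ (by omega)]
    rfl
  by_cases h13 : vol ≤ 2189
  · -- region 13
    have e : wbBisect [143, 287, 431, 719, 1007, 1061, 1115, 1169, 1313, 1601, 1655, 1919, 2045, 2189, 2405] vol 0 15 = 13 := by
      rw [bisL _ _ _ _ (by norm_num) (by show (1169:Int) < vol; omega)]; norm_num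
      rw [bisL _ _ _ _ (by norm_num) (by show (1919:Int) < vol; omega)]; norm_num
      rw [bisG _ _ _ _ (by norm_num) (by show ¬ (2189:Int) < vol; omega)]; norm_num
      rw [bisL _ _ _ _ (by norm_num) (by show (2045:Int) < vol; omega)]; norm_num
      exact bisE _ _ _ _ (by norm_num)
    rw [e]
    rw [if_pos (by norm_num : (13:Nat) < 15)]
    rw [scanNeg _ _ _ _ (by omega)]
    rw [scanNeg _ _ _ _ (by omega)]
    rw [scanNeg _ _ _ _ (by omega)]
    rw [scanNeg _ _ _ _ (by omega)]
    rw [scanNeg _ _ _ _ (by omega)]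
    rw [scanNeg _ _ _ _ (by omega)]
    rw [scanNeg _ _ _ _ (by omega)]
    rw [scanNeg _ _ _ _ (by omega)]
    rw [scanNeg _ _ _ _ (by omega)]
    rw [scanNeg _ _ _ _ (by omega)]
    rw [scanNeg _ _ _ _ (by omega)]
    rw [scanNeg _ _ _ _ (by omega)]
    rw [scanNeg _ _ _ _ (by omega)]
    rw [scanPos _ _ _ _ (by omega)]
    rfl
  by_cases h14 : vol ≤ 2405
  · -- region 14
    have e : wbBisect [143, 287, 431, 719, 1007, 1061, 1115, 1169, 1313, 1601, 1655, 1919, 2045, 2189, 2405] vol 0 15 = 14 := by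
      rw [bisL _ _ _ _ (by norm_num) (by show (1169:Int) < vol; omega)]; norm_num
      rw [bisL _ _ _ _ (by norm_num) (by show (1919:Int) < vol; omega)]; norm_num
      rw [bisL _ _ _ _ (by norm_num) (by show (2189:Int) < vol; omega)]; norm_num
      rw [bisG _ _ _ _ (by norm_num) (by show ¬ (2405:Int) < vol; omega)]; norm_num
      exact bisE _ _ _ _ (by norm_num)
    rw [e]
    rw [if_pos (by norm_num : (14:Nat) < 15)]
    rw [scanNeg _ _ _ _ (by omega)]
    rw [scanNeg _ _ _ _ (by omega)]
    rw [scanNeg _ _ _ _ (by omega)]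
    rw [scanNeg _ _ _ _ (by omega)]
    rw [scanNeg _ _ _ _ (by omega)]
    rw [scanNeg _ _ _ _ (by omega)]
    rw [scanNeg _ _ _ _ (by omega)]
    rw [scanNeg _ _ _ _ (by omega)]
    rw [scanNeg _ _ _ _ (by omega)]
    rw [scanNeg _ _ _ _ (by omega)]
    rw [scanNeg _ _ _ _ (by omega)]
    rw [scanNeg _ _ _ _ (by omega)]
    rw [scanNeg _ _ _ _ (by omega)]
    rw [scanNeg _ _ _ _ (by omega)]
    rw [scanPos _ _ _ _ (by omega)]
    rfl
  -- region 15
  have e : wbBisect [143, 287, 431, 719, 1007, 1061, 1115, 1169, 1313, 1601, 1655, 1919, 2045, 2189, 2405] vol 0 15 = 15 := by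
    rw [bisL _ _ _ _ (by norm_num) (by show (1169:Int) < vol; omega)]; norm_num
    rw [bisL _ _ _ _ (by norm_num) (by show (1919:Int) < vol; omega)]; norm_num
    rw [bisL _ _ _ _ (by norm_num) (by show (2189:Int) < vol; omega)]; norm_num
    rw [bisL _ _ _ _ (by norm_num) (by show (2405:Int) < vol; omega)]; norm_num
    exact bisE _ _ _ _ (by norm_num)
  rw [e]
  rw [if_neg (by norm_num : ¬ (15:Nat) < 15)]
  rw [scanNeg _ _ _ _ (by omega)]
  rw [scanNeg _ _ _ _ (by omega)]
  rw [scanNeg _ _ _ _ (by omega)]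
  rw [scanNeg _ _ _ _ (by omega)]
  rw [scanNeg _ _ _ _ (by omega)]
  rw [scanNeg _ _ _ _ (by omega)]
  rw [scanNeg _ _ _ _ (by omega)]
  rw [scanNeg _ _ _ _ (by omega)]
  rw [scanNeg _ _ _ _ (by omega)]
  rw [scanNeg _ _ _ _ (by omega)]
  rw [scanNeg _ _ _ _ (by omega)]
  rw [scanNeg _ _ _ _ (by omega)]
  rw [scanNeg _ _ _ _ (by omega)]
  rw [scanNeg _ _ _ _ (by omega)]
  rw [scanNeg _ _ _ _ (by omega)]
  rfl

-- ===== VERDICT (by name: the statement is the Claim_ definition above) =====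
theorem wb_get_image_url_spec : Claim_equal_wb_get_image_url := by
  intro product_id photo_index _
  show wb_get_image_url product_id photo_index = wb_get_image_url_alt product_id photo_index
  simp only [wb_get_image_url, wb_get_image_url_alt, List.length_cons, List.length_nil,
    Nat.reduceAdd, wbBasket_eq]
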